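-- pv_equiv track=rewrite | github.com/Jasonbhaas/PythonCodingProjects | LeetCodes/MergeStrings.py | MergeStrings
-- ===== SOURCE A (Python) =====
-- def MergeStrings(strings):
--     valid_chars = 'abcdefghijklmnopqrstuvwxyz'
--     counter = {}
--
--     for char in valid_chars:
--         counter[char] = 0
--     for string in strings:
--         for char in string:
--             if char in valid_chars:
--                 counter[char] += 1
--
--     str_list = []
--     for char in valid_chars:
--         str_list.append(char * counter[char])
--
--     return "".join(str_list)
-- ===== SOURCE B (Python) =====
-- def MergeStrings(strings):
--     valid_chars = 'abcdefghijklmnopqrstuvwxyz'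
--     chars = [c for s in strings for c in s if c in valid_chars]
--     return "".join(sorted(chars))
-- ===== Notes on version B (the rewrite author's own statement) =====
-- stated objective: idiomatic
-- what changed: Replaces the per-letter count table and the explicit a-z rebuild scan with a single collect-filter pass followed by a comparison sort of the collected characters.
import Mathlib
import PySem

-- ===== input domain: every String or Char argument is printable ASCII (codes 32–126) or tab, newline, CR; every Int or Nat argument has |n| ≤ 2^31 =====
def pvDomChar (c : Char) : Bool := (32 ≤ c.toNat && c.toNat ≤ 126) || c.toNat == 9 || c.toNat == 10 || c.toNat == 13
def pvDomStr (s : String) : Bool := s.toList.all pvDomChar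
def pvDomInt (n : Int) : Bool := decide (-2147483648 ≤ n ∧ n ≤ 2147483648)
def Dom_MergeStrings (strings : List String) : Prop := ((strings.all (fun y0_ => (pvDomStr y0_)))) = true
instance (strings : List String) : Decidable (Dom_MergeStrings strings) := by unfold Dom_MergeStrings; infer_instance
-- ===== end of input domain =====

-- B replaces A's per-letter count table and a-z rebuild scan by collecting the lowercase
-- characters in one pass and comparison-sorting them (more idiomatic; no speed claim).

-- ===== PORT A =====
-- 'abcdefghijklmnopqrstuvwxyz' as a char list (Python's `char in valid_chars` on a
-- single character is exactly membership of that char among the string's characters)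
def pvValid : List Char := "abcdefghijklmnopqrstuvwxyz".toList

def MergeStrings (strings : List String) : String :=
  let counter0 : PySem.Dict Char Int :=
    pvValid.foldl (fun d c => d.insert c 0) PySem.Dict.empty
  let counter : PySem.Dict Char Int :=
    strings.foldl (fun d s =>
      s.toList.foldl (fun d c =>
        if pvValid.contains c then d.insert c (d.getD c 0 + 1) else d) d) counter0
  -- str_list: char * counter[char] is PySem.List.pyRepeat; "".join flattens the chunks
  let strList : List (List Char) :=
    pvValid.foldl (fun acc c => acc ++ [PySem.List.pyRepeat [c] (counter.getD c 0)]) []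
  String.ofList strList.flatten

-- ===== PORT B =====
def MergeStrings_alt (strings : List String) : String :=
  let chars : List Char :=
    strings.flatMap (fun s => s.toList.filter (fun c => pvValid.contains c))
  String.ofList (PySem.List.sorted chars (fun c => c) false)

-- ===== PRECONDITION & SPEC =====
def Spec_MergeStrings (strings : List String) (out : String) : Prop := out = MergeStrings_alt strings
instance (strings : List String) (out : String) : Decidable (Spec_MergeStrings strings out) := by unfold Spec_MergeStrings; infer_instance

-- ===== CLAIM (what is proved, stated in full; the proofs are below) =====
def Claim_equal_MergeStrings : Prop := ∀ (strings : List String), Dom_MergeStrings strings → Spec_MergeStrings strings (MergeStrings strings)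

-- ===== LEMMAS AND PROOFS =====

-- the initialisation loop leaves every lookup-with-default-0 at 0
theorem pv_getD_init (ks : List Char) (d : PySem.Dict Char Int)
    (h : ∀ c, d.getD c 0 = 0) :
    ∀ c, (ks.foldl (fun d c => d.insert c (0:Int)) d).getD c 0 = 0 := by
  induction ks generalizing d with
  | nil => exact h
  | cons k t ih =>
      intro c
      refine ih _ (fun c => ?_) c
      rw [PySem.Dict.getD_insert]
      split <;> simp [h]

-- one string's inner loop adds the filtered counts
theorem pv_getD_inner (l : List Char) (d : PySem.Dict Char Int) (c : Char) :
    (l.foldl (fun d c =>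
        if pvValid.contains c then d.insert c (d.getD c 0 + 1) else d) d).getD c 0
      = d.getD c 0 + ((l.filter (fun c => pvValid.contains c)).count c : Int) := by
  induction l generalizing d with
  | nil => simp
  | cons x t ih =>
      simp only [List.foldl_cons, List.filter_cons]
      by_cases hx : pvValid.contains x = true
      · simp only [hx, if_true]
        rw [ih, PySem.Dict.getD_insert, List.count_cons]
        by_cases hxc : c = x
        · subst hxc; simp; ring
        · rw [if_neg hxc, if_neg (by simpa using fun h => hxc h.symm)]
          push_cast; ring
      · simp only [hx, Bool.false_eq_true, if_false]
        rw [ih]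

-- the whole counting loop: counter[c] = count of c among the kept characters
theorem pv_getD_outer (strings : List String) (d : PySem.Dict Char Int) (c : Char) :
    (strings.foldl (fun d s =>
        s.toList.foldl (fun d c =>
          if pvValid.contains c then d.insert c (d.getD c 0 + 1) else d) d) d).getD c 0
      = d.getD c 0 +
        ((strings.flatMap (fun s => s.toList.filter (fun c => pvValid.contains c))).count c : Int) := by
  induction strings generalizing d with
  | nil => simp
  | cons s t ih =>
      simp only [List.foldl_cons, List.flatMap_cons, List.count_append]
      rw [ih, pv_getD_inner]
      push_cast; ring

-- the rebuild loop is a map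
theorem pv_foldl_chunks (ks : List Char) (f : Char → List Char) (acc : List (List Char)) :
    ks.foldl (fun acc c => acc ++ [f c]) acc = acc ++ ks.map f := by
  induction ks generalizing acc with
  | nil => simp
  | cons k t ih => simp [ih]

-- counting-sort characterisation: for Nodup keys covering F, the concatenation of
-- replicate-count blocks is a permutation of F
theorem pv_perm (ks : List Char) (F : List Char)
    (hnd : ks.Nodup) (hmem : ∀ x ∈ F, x ∈ ks) :
    (ks.flatMap (fun c => List.replicate (F.count c) c)).Perm F := by
  induction ks generalizing F with
  | nil =>
      have hF : F = [] :=
        List.eq_nil_iff_forall_not_mem.mpr (fun a ha => by simpa using hmem a ha)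
      simp [hF]
  | cons k t ih =>
      have hknd : k ∉ t := (List.nodup_cons.mp hnd).1
      have htnd : t.Nodup := (List.nodup_cons.mp hnd).2
      simp only [List.flatMap_cons]
      have hsplit : (F.filter (fun x => x == k) ++ F.filter (fun x => !(x == k))).Perm F :=
        List.filter_append_perm _ F
      have h1 : F.filter (fun x => x == k) = List.replicate (F.count k) k := by
        exact List.filter_beq k
      have hcnt : ∀ c ∈ t, (F.filter (fun x => !(x == k))).count c = F.count c := by
        intro c hc
        have hck : ¬ (c == k) = true := by
          simp only [beq_iff_eq]
          intro h; exact hknd (h ▸ hc)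
        rw [List.count_filter]
        simp [hck]
      have h2 : (t.flatMap (fun c =>
          List.replicate ((F.filter (fun x => !(x == k))).count c) c)).Perm
          (F.filter (fun x => !(x == k))) := by
        refine ih (F.filter (fun x => !(x == k))) htnd (fun x hx => ?_)
        have hxF := List.mem_of_mem_filter hx
        have hxk : ¬ (x == k) = true := by simpa using List.of_mem_filter hx
        have hxmem := hmem x hxF
        simp only [List.mem_cons] at hxmem
        rcases hxmem with h | h
        · exact absurd (by simp [h]) hxk
        · exact h
      have hmapeq : (t.flatMap (fun c => List.replicate (F.count c) c))
          = t.flatMap (fun c => List.replicate ((F.filter (fun x => !(x == k))).count c) c) := by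
        rw [List.flatMap_def, List.flatMap_def]
        exact congrArg List.flatten (List.map_congr_left (fun x hx => by rw [hcnt x hx]))
      have h1p : (List.replicate (F.count k) k).Perm (F.filter (fun x => x == k)) := by
        rw [h1]
      have h2p : (t.flatMap (fun c => List.replicate (F.count c) c)).Perm
          (F.filter (fun x => !(x == k))) := hmapeq ▸ h2
      exact (List.Perm.append h1p h2p).trans hsplit

-- sortedness of the block concatenation
theorem pv_pairwise (ks : List Char) (n : Char → Nat)
    (h : ks.Pairwise (· < ·)) :
    (ks.flatMap (fun c => List.replicate (n c) c)).Pairwise (· ≤ ·) := by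
  rw [List.flatMap_def, List.pairwise_flatten]
  constructor
  · intro l hl
    simp only [List.mem_map] at hl
    obtain ⟨c, _, rfl⟩ := hl
    exact List.pairwise_replicate.mpr (Or.inr le_rfl)
  · refine List.pairwise_map.mpr ?_
    refine h.imp ?_
    intro a b hab x hx y hy
    rw [List.eq_of_mem_replicate hx, List.eq_of_mem_replicate hy]
    exact le_of_lt hab

theorem pv_eq (strings : List String) :
    MergeStrings strings = MergeStrings_alt strings := by
  simp only [MergeStrings, MergeStrings_alt]
  have h0 : ∀ c : Char,
      (pvValid.foldl (fun d c => d.insert c (0:Int)) PySem.Dict.empty).getD c 0 = 0 :=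
    pv_getD_init pvValid PySem.Dict.empty (fun c => by simp)
  have hc : ∀ c : Char,
      ((strings.foldl (fun d s =>
          s.toList.foldl (fun d c =>
            if pvValid.contains c then d.insert c (d.getD c 0 + 1) else d) d)
        (pvValid.foldl (fun d c => d.insert c (0:Int)) PySem.Dict.empty)).getD c 0)
      = ((strings.flatMap (fun s => s.toList.filter (fun c => pvValid.contains c))).count c : Int) := by
    intro c; rw [pv_getD_outer, h0, zero_add]
  rw [pv_foldl_chunks, List.nil_append]
  have hmap : (pvValid.map (fun c => PySem.List.pyRepeat [c]
        ((strings.foldl (fun d s =>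
            s.toList.foldl (fun d c =>
              if pvValid.contains c then d.insert c (d.getD c 0 + 1) else d) d)
          (pvValid.foldl (fun d c => d.insert c (0:Int)) PySem.Dict.empty)).getD c 0)))
      = pvValid.map (fun c => List.replicate
          ((strings.flatMap (fun s => s.toList.filter (fun c => pvValid.contains c))).count c) c) := by
    refine List.map_congr_left (fun c _ => ?_)
    rw [hc c, PySem.List.pyRepeat_singleton, Int.toNat_natCast]
  rw [hmap]
  congr 1
  have hperm : (pvValid.flatMap (fun c => List.replicate
      ((strings.flatMap (fun s => s.toList.filter (fun c => pvValid.contains c))).count c) c)).Perm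
      (strings.flatMap (fun s => s.toList.filter (fun c => pvValid.contains c))) := by
    refine pv_perm pvValid _ (by decide) (fun x hx => ?_)
    rw [List.mem_flatMap] at hx
    obtain ⟨s, _, hxs⟩ := hx
    simpa using List.of_mem_filter hxs
  have hpw : (pvValid.flatMap (fun c => List.replicate
      ((strings.flatMap (fun s => s.toList.filter (fun c => pvValid.contains c))).count c) c)).Pairwise
      (· ≤ ·) := pv_pairwise pvValid _ (by decide)
  rw [← List.flatMap_def]
  exact (PySem.List.sorted_id_eq_of_perm_of_pairwise _ _ hperm hpw).symm

-- ===== VERDICT (by name: the statement is the Claim_ definition above) =====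
theorem MergeStrings_spec : Claim_equal_MergeStrings := by
  intro strings _
  exact pv_eq strings
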